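-- pv_equiv track=rewrite | github.com/huatringuyen345-beep/237480201082_17DCNTT2_BAITAP_CHUONG4_PYTHON | cau25_tr124.py | sap_xep_chan_khong_le
-- ===== SOURCE A (Python) =====
-- def sap_xep_chan_khong_le(L):
--     chan = []
--     khong = []
--     le = []
--
--     for x in L:
--         if x == 0:
--             khong.append(x)
--         elif x % 2 == 0:
--             chan.append(x)
--         else:
--             le.append(x)
--
--     return chan + khong + le
-- ===== SOURCE B (Python) =====
-- def sap_xep_chan_khong_le(L):
--     def key(x):
--         if x == 0:
--             return 1
--         if x % 2 == 0:
--             return 0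
--         return 2
--     return sorted(L, key=key)
-- ===== Notes on version B (the rewrite author's own statement) =====
-- stated objective: idiomatic
-- what changed: Replaces the explicit three-accumulator loop with a single stable sort under a 3-valued key (nonzero even -> 0, zero -> 1, odd -> 2), relying on sort stability for within-group order.
import Mathlib
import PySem

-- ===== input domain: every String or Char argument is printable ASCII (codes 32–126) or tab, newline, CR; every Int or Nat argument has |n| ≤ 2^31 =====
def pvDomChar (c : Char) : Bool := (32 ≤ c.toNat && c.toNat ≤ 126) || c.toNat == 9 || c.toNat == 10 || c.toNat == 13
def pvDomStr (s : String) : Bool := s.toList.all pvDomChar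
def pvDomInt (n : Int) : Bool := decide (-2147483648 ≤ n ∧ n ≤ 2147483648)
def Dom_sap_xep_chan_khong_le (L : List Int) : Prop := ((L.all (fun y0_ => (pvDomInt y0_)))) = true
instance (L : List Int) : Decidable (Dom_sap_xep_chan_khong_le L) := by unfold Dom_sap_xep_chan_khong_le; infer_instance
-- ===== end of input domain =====

-- B replaces A's one-pass three-accumulator partition by a single stable sort under a
-- 3-valued key (nonzero even -> 0, zero -> 1, odd -> 2); same return value, more idiomatic.

-- ===== PORT A =====
def sap_xep_chan_khong_le (L : List Int) : List Int :=
  let s := L.foldl (fun (st : List Int × List Int × List Int) x =>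
    if x == 0 then (st.1, st.2.1 ++ [x], st.2.2)
    else if PySem.Int.mod x 2 == 0 then (st.1 ++ [x], st.2.1, st.2.2)
    else (st.1, st.2.1, st.2.2 ++ [x])) ([], [], [])
  s.1 ++ s.2.1 ++ s.2.2

-- ===== PORT B =====
def pvKey (x : Int) : Int :=
  if x == 0 then 1 else if PySem.Int.mod x 2 == 0 then 0 else 2

def sap_xep_chan_khong_le_alt (L : List Int) : List Int :=
  PySem.List.sorted L pvKey

-- ===== PRECONDITION & SPEC =====
def Spec_sap_xep_chan_khong_le (L : List Int) (out : List Int) : Prop := out = sap_xep_chan_khong_le_alt L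
instance (L : List Int) (out : List Int) : Decidable (Spec_sap_xep_chan_khong_le L out) := by unfold Spec_sap_xep_chan_khong_le; infer_instance

-- ===== CLAIM (what is proved, stated in full; the proofs are below) =====
def Claim_equal_sap_xep_chan_khong_le : Prop := ∀ (L : List Int), Dom_sap_xep_chan_khong_le L → Spec_sap_xep_chan_khong_le L (sap_xep_chan_khong_le L)

-- ===== LEMMAS AND PROOFS =====

-- the segmented form both programs compute
def pvSeg (L : List Int) : List Int :=
  L.filter (fun x => pvKey x == 0) ++ L.filter (fun x => pvKey x == 1) ++ L.filter (fun x => pvKey x == 2)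

lemma pvKey_cases (x : Int) : pvKey x = 0 ∨ pvKey x = 1 ∨ pvKey x = 2 := by
  unfold pvKey; split_ifs <;> simp

lemma insertBy_append_not_before (bef : Int → Int → Bool) (x : Int) (as bs : List Int)
    (h : ∀ a ∈ as, bef x a = false) :
    PySem.List.insertBy bef x (as ++ bs) = as ++ PySem.List.insertBy bef x bs := by
  induction as with
  | nil => simp
  | cons a t ih =>
    simp only [List.cons_append, PySem.List.insertBy, h a (by simp)]
    simp [ih (fun a ha => h a (by simp [ha]))]

lemma insertBy_all_before (bef : Int → Int → Bool) (x : Int) (bs : List Int)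
    (h : ∀ b ∈ bs, bef x b = true) :
    PySem.List.insertBy bef x bs = x :: bs := by
  cases bs with
  | nil => simp [PySem.List.insertBy]
  | cons b t => simp [PySem.List.insertBy, h b (by simp)]

lemma pvSeg_step (x : Int) (P : List Int) :
    PySem.List.insertBy (fun a b => decide (pvKey a < pvKey b)) x (pvSeg P)
      = pvSeg (P ++ [x]) := by
  unfold pvSeg
  have k0 : ∀ a ∈ P.filter (fun x => pvKey x == 0), pvKey a = 0 := by
    intro a ha; simpa using (List.of_mem_filter ha)
  have k1 : ∀ a ∈ P.filter (fun x => pvKey x == 1), pvKey a = 1 := by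
    intro a ha; simpa using (List.of_mem_filter ha)
  have k2 : ∀ a ∈ P.filter (fun x => pvKey x == 2), pvKey a = 2 := by
    intro a ha; simpa using (List.of_mem_filter ha)
  rcases pvKey_cases x with hk | hk | hk
  · -- key 0: x goes at the end of the first segment
    rw [List.append_assoc]
    rw [insertBy_append_not_before _ _ _ _
          (by intro a ha; simp [hk, k0 a ha])]
    rw [insertBy_all_before _ _ _
          (by intro b hb; rcases List.mem_append.1 hb with h | h
              · simp [hk, k1 b h]
              · simp [hk, k2 b h])]
    simp [List.filter_append, hk]
  · -- key 1: x goes between the first and last segments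
    rw [insertBy_append_not_before _ _ _ _
          (by intro a ha; rcases List.mem_append.1 ha with h | h
              · simp [hk, k0 a h]
              · simp [hk, k1 a h])]
    rw [insertBy_all_before _ _ _ (by intro b hb; simp [hk, k2 b hb])]
    simp [List.filter_append, hk]
  · -- key 2: x goes at the very end
    rw [PySem.List.insertBy_of_forall_not_before _ _ _
          (by intro a ha
              rcases List.mem_append.1 ha with h | h
              · rcases List.mem_append.1 h with h' | h'
                · simp [hk, k0 a h']
                · simp [hk, k1 a h']
              · simp [hk, k2 a h])]
    simp [List.filter_append, hk]

lemma alt_eq_seg (L : List Int) : sap_xep_chan_khong_le_alt L = pvSeg L := by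
  unfold sap_xep_chan_khong_le_alt
  rw [PySem.List.sorted_eq_foldl_insertBy]
  induction L using List.reverseRecOn with
  | nil => simp [pvSeg]
  | append_singleton P x ih =>
    rw [List.foldl_append, List.foldl_cons, List.foldl_nil, ih, pvSeg_step]

lemma a_foldl (L : List Int) (c k l : List Int) :
    L.foldl (fun (st : List Int × List Int × List Int) x =>
      if x == 0 then (st.1, st.2.1 ++ [x], st.2.2)
      else if PySem.Int.mod x 2 == 0 then (st.1 ++ [x], st.2.1, st.2.2)
      else (st.1, st.2.1, st.2.2 ++ [x])) (c, k, l)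
    = (c ++ L.filter (fun x => pvKey x == 0),
       k ++ L.filter (fun x => pvKey x == 1),
       l ++ L.filter (fun x => pvKey x == 2)) := by
  induction L generalizing c k l with
  | nil => simp
  | cons x t ih =>
    rw [List.foldl_cons]
    by_cases h0 : x = 0
    · have hk : pvKey x = 1 := by simp [pvKey, h0]
      rw [if_pos (by simp [h0]), ih]
      simp [hk]
    · by_cases h2 : PySem.Int.mod x 2 = 0
      · have hdvd : (2:Int) ∣ x := by
          rw [PySem.Int.mod, Int.fmod_eq_emod_of_nonneg _ (by norm_num)] at h2; omega
        have hk : pvKey x = 0 := by simp [pvKey, h0, hdvd]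
        rw [if_neg (by simp [h0]), if_pos (by simp [hdvd]), ih]
        simp [hk]
      · have hnd : ¬ (2:Int) ∣ x := by
          rw [PySem.Int.mod, Int.fmod_eq_emod_of_nonneg _ (by norm_num)] at h2; omega
        have hk : pvKey x = 2 := by simp [pvKey, h0, hnd]
        rw [if_neg (by simp [h0]), if_neg (by simp [hnd]), ih]
        simp [hk]

lemma a_eq_seg (L : List Int) : sap_xep_chan_khong_le L = pvSeg L := by
  unfold sap_xep_chan_khong_le pvSeg
  rw [a_foldl]
  simp

-- ===== VERDICT (by name: the statement is the Claim_ definition above) =====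
theorem sap_xep_chan_khong_le_spec : Claim_equal_sap_xep_chan_khong_le := by
  intro L _
  unfold Spec_sap_xep_chan_khong_le
  rw [a_eq_seg, alt_eq_seg]
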